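-- pv_equiv track=rewrite | github.com/MariaTxell/proyectoRestaurante | apps/home/routes.py | obtener_horas_disponibles
-- ===== SOURCE A (Python) =====
-- def obtener_horas_disponibles(tipo_horario):
--     # Obtener las horas disponibles según el tipo de horario del restaurante
--     if tipo_horario == 'Completo':
--         return [(f"{hour:02d}:00", f"{hour:02d}:00") for hour in range(7, 23)]
--     elif tipo_horario == 'Matinal':
--         return [(f"{hour:02d}:00", f"{hour:02d}:00") for hour in range(7, 12)]
--     elif tipo_horario == 'Mediodia':
--         return [(f"{hour:02d}:00", f"{hour:02d}:00") for hour in range(12, 16)]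
--     elif tipo_horario == 'Nocturno':
--         return [(f"{hour:02d}:00", f"{hour:02d}:00") for hour in range(18, 23)]
--     return []
-- ===== SOURCE B (Python) =====
-- # Open (schedule-type, hour) pairs, precomputed once from the interval table.
-- _ABIERTO = {
--     (t, h)
--     for t, (inicio, fin) in [('Completo', (7, 23)), ('Matinal', (7, 12)),
--                              ('Mediodia', (12, 16)), ('Nocturno', (18, 23))]
--     for h in range(inicio, fin)
-- }
--
-- def obtener_horas_disponibles(tipo_horario):
--     # Scan the whole day once and keep the hours open for this schedule type.
--     horas = []
--     for h in range(24):
--         if (tipo_horario, h) in _ABIERTO: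
--             etiqueta = f"{h:02d}:00"
--             horas.append((etiqueta, etiqueta))
--     return horas
-- ===== Notes on version B (the rewrite author's own statement) =====
-- stated objective: alternative
-- what changed: Instead of branching on the type and generating each interval with its own comprehension, B precomputes the set of open (type, hour) pairs once and per call scans all 24 hours of the day with an accumulator, keeping each hour whose pair is in the set; unknown types naturally yield [].
import Mathlib
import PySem

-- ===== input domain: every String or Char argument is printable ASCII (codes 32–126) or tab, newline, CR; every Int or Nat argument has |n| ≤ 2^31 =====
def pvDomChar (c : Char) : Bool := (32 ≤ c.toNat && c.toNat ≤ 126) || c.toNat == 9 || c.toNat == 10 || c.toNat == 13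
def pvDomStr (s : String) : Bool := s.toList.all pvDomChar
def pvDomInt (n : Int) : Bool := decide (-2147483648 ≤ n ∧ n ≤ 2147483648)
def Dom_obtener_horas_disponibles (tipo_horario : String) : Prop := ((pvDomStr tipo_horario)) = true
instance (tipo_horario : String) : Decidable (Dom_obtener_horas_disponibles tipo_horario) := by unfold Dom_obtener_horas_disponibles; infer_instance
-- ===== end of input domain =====

-- B replaces A's four-branch if/elif chain (one comprehension per branch) by a precomputed set of
-- open (type, hour) pairs and one accumulator scan over all 24 hours of the day (alternative).

-- f"{hour:02d}:00": exact for 0 ≤ h < 100, which covers every hour either program formats (0..23)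
def pvFmtHour (h : Int) : String := (if h < 10 then "0" else "") ++ PySem.Int.toStr h ++ ":00"

-- ===== PORT A =====
def obtener_horas_disponibles (tipo_horario : String) : List (String × String) :=
  if tipo_horario == "Completo" then
    (PySem.List.pyRange 7 23 1).map (fun hour => (pvFmtHour hour, pvFmtHour hour))
  else if tipo_horario == "Matinal" then
    (PySem.List.pyRange 7 12 1).map (fun hour => (pvFmtHour hour, pvFmtHour hour))
  else if tipo_horario == "Mediodia" then
    (PySem.List.pyRange 12 16 1).map (fun hour => (pvFmtHour hour, pvFmtHour hour))
  else if tipo_horario == "Nocturno" then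
    (PySem.List.pyRange 18 23 1).map (fun hour => (pvFmtHour hour, pvFmtHour hour))
  else []

-- ===== PORT B =====
-- the Python set comprehension _ABIERTO; only membership is consumed, never its iteration order
def pvAbierto : PySem.Set (String × Int) :=
  PySem.Set.ofList
    (([("Completo", ((7 : Int), (23 : Int))), ("Matinal", (7, 12)),
       ("Mediodia", (12, 16)), ("Nocturno", (18, 23))] : List (String × Int × Int)).flatMap
      (fun p => (PySem.List.pyRange p.2.1 p.2.2 1).map (fun h => (p.1, h))))

def obtener_horas_disponibles_alt (tipo_horario : String) : List (String × String) :=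
  (PySem.List.pyRange 0 24 1).foldl
    (fun horas h =>
      if PySem.Set.contains pvAbierto (tipo_horario, h) then
        let etiqueta := pvFmtHour h
        horas ++ [(etiqueta, etiqueta)]
      else horas) []

-- ===== PRECONDITION & SPEC =====
def Spec_obtener_horas_disponibles (tipo_horario : String) (out : List (String × String)) : Prop := out = obtener_horas_disponibles_alt tipo_horario
instance (tipo_horario : String) (out : List (String × String)) : Decidable (Spec_obtener_horas_disponibles tipo_horario out) := by unfold Spec_obtener_horas_disponibles; infer_instance

-- ===== CLAIM (what is proved, stated in full; the proofs are below) =====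
def Claim_equal_obtener_horas_disponibles : Prop := ∀ (tipo_horario : String), Dom_obtener_horas_disponibles tipo_horario → Spec_obtener_horas_disponibles tipo_horario (obtener_horas_disponibles tipo_horario)

-- ===== LEMMAS AND PROOFS =====
-- for a type other than the four table keys, no (t, h) pair is in the set, so B's scan keeps nothing
theorem pvAbierto_not_mem (t : String) (h : Int)
    (h1 : t ≠ "Completo") (h2 : t ≠ "Matinal") (h3 : t ≠ "Mediodia") (h4 : t ≠ "Nocturno") :
    (t, h) ∉ pvAbierto := by
  intro hc
  rw [pvAbierto, PySem.Set.mem_ofList] at hc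
  simp [PySem.List.pyRange, List.flatMap] at hc
  rcases hc with ⟨ht, _⟩ | ⟨ht, _⟩ | ⟨ht, _⟩ | ⟨ht, _⟩ <;> simp_all

-- ===== VERDICT (by name: the statement is the Claim_ definition above) =====
theorem obtener_horas_disponibles_spec : Claim_equal_obtener_horas_disponibles := by
  intro t _
  unfold Spec_obtener_horas_disponibles obtener_horas_disponibles obtener_horas_disponibles_alt
  by_cases h1 : t = "Completo"
  · subst h1; decide
  by_cases h2 : t = "Matinal"
  · subst h2; decide
  by_cases h3 : t = "Mediodia"
  · subst h3; decide
  by_cases h4 : t = "Nocturno"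
  · subst h4; decide
  simp only [beq_iff_eq, h1, h2, h3, h4, if_false]
  simp [PySem.List.pyRange, pvAbierto_not_mem t _ h1 h2 h3 h4]
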